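-- pv_equiv track=rewrite | github.com/baptistejeh07-art/finsight-ia | outputs/cmp_secteur_pdf_writer.py | _rich
-- ===== SOURCE A (Python) =====
-- def _rich(s: str) -> str:
--     """Variante de _xml qui PRÉSERVE les balises ReportLab inline (<b>, </b>,
--     <i>, </i>, <br/>, <font ...>).
--
--     Strategie : echappe d'abord & puis < > en `&lt;` `&gt;`, puis re-introduit
--     les balises connues. Permet d'utiliser de la mise en forme dans des textes
--     qui contiennent par ailleurs des donnees utilisateur a echapper.
--     """
--     if not s:
--         return ""
--     # Escape complet
--     out = str(s).replace("&", "&amp;").replace("<", "&lt;").replace(">", "&gt;")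
--     # Restaure les balises inline ReportLab
--     _SAFE_TAGS = ("b", "/b", "i", "/i", "u", "/u", "br/", "br /", "sub", "/sub", "sup", "/sup")
--     for tag in _SAFE_TAGS:
--         out = out.replace(f"&lt;{tag}&gt;", f"<{tag}>")
--     return out
-- ===== SOURCE B (Python) =====
-- _SAFE_TAGS = ("b", "/b", "i", "/i", "u", "/u", "br/", "br /", "sub", "/sub", "sup", "/sup")
-- _ESC = {"&": "&amp;", "<": "&lt;", ">": "&gt;"}
--
--
-- def _rich(s: str) -> str:
--     """Single pass: copy a known safe ReportLab tag verbatim, escape any other char."""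
--     if not s:
--         return ""
--     s = str(s)
--     out = []
--     i = 0
--     n = len(s)
--     while i < n:
--         c = s[i]
--         if c == "<":
--             for t in _SAFE_TAGS:
--                 tag = "<" + t + ">"
--                 if s.startswith(tag, i):
--                     out.append(tag)
--                     i += len(tag)
--                     break
--             else:
--                 out.append("&lt;")
--                 i += 1
--         else:
--             out.append(_ESC.get(c, c))
--             i += 1
--     return "".join(out)
-- ===== Notes on version B (the rewrite author's own statement) =====
-- stated objective: alternative
-- what changed: Replaces A's fifteen sequential whole-string replace passes (escape &, <, > then un-escape each of the 12 safe tags) by a single left-to-right scan that copies a safe tag verbatim when one starts at the cursor and XML-escapes the current character otherwise.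
import Mathlib
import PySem

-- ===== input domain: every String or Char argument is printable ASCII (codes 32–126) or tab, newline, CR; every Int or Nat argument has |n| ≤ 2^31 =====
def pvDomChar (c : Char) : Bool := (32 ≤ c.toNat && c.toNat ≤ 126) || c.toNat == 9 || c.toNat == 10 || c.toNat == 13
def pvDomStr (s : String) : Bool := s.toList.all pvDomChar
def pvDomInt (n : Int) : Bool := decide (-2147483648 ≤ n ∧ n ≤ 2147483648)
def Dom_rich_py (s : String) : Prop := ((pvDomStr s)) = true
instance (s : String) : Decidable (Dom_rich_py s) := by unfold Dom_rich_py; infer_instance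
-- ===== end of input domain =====

-- B replaces A's fifteen whole-string replace passes by one left-to-right scan
-- that copies a safe ReportLab tag verbatim and XML-escapes every other character
-- (objective: alternative; equal return value proved below).

-- ===== PORT A =====
-- the tuple _SAFE_TAGS from A
def pvSafeTags : List String :=
  ["b", "/b", "i", "/i", "u", "/u", "br/", "br /", "sub", "/sub", "sup", "/sup"]

def rich_py (s : String) : String :=
  if s = "" then ""
  else
    pvSafeTags.foldl
      (fun out tag => PySem.Str.replace out ("&lt;" ++ tag ++ "&gt;") ("<" ++ tag ++ ">"))
      (PySem.Str.replace (PySem.Str.replace (PySem.Str.replace s "&" "&amp;") "<" "&lt;") ">" "&gt;")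

-- ===== PORT B =====
-- _SAFE_TAGS of Source B, as char lists (the scanner works on code points)
def pvSafeTagsL : List (List Char) :=
  [['b'], ['/', 'b'], ['i'], ['/', 'i'], ['u'], ['/', 'u'],
   ['b', 'r', '/'], ['b', 'r', ' ', '/'],
   ['s', 'u', 'b'], ['/', 's', 'u', 'b'], ['s', 'u', 'p'], ['/', 's', 'u', 'p']]

-- the inner `for t in _SAFE_TAGS: if s.startswith("<"+t+">", i)` loop of Source B
def pvFindTag (l : List Char) : Option (List Char) :=
  pvSafeTagsL.find? (fun t => ('<' :: t ++ ['>']).isPrefixOf l)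

-- the `while i < n` loop of Source B
def pvScan : List Char → List Char
  | [] => []
  | c :: r =>
    if c = '<' then
      match pvFindTag (c :: r) with
      | some t => ('<' :: t ++ ['>']) ++ pvScan (r.drop (t.length + 1))
      | none => '&' :: 'l' :: 't' :: ';' :: pvScan r
    else if c = '&' then '&' :: 'a' :: 'm' :: 'p' :: ';' :: pvScan r
    else if c = '>' then '&' :: 'g' :: 't' :: ';' :: pvScan r
    else c :: pvScan r
termination_by l => l.length
decreasing_by
  all_goals simp [List.length_drop]

def rich_py_alt (s : String) : String :=
  if s = "" then "" else String.ofList (pvScan s.toList)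

-- ===== PRECONDITION & SPEC =====
def Spec_rich_py (s : String) (out : String) : Prop := out = rich_py_alt s
instance (s : String) (out : String) : Decidable (Spec_rich_py s out) := by unfold Spec_rich_py; infer_instance

-- ===== CLAIM (what is proved, stated in full; the proofs are below) =====
def Claim_equal_rich_py : Prop := ∀ (s : String), Dom_rich_py s → Spec_rich_py s (rich_py s)

-- ===== LEMMAS AND PROOFS =====

-- structural form of PySem.Chars.replace for a nonempty pattern
def pvRep (o : Char) (os : List Char) (new : List Char) : List Char → List Char
  | [] => []
  | c :: t =>
    if (o :: os).isPrefixOf (c :: t) then new ++ pvRep o os new (t.drop os.length)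
    else c :: pvRep o os new t
termination_by l => l.length
decreasing_by
  all_goals simp [List.length_drop]

lemma pvRep_go_spec (o : Char) (os new : List Char) :
    ∀ (fuel : Nat) (l acc : List Char), l.length ≤ fuel →
      PySem.Chars.replace.go (o :: os) new fuel l acc = acc.reverse ++ pvRep o os new l := by
  intro fuel
  induction fuel with
  | zero =>
    intro l acc hl
    have : l = [] := by
      cases l with
      | nil => rfl
      | cons c t => simp at hl
    subst this
    simp [PySem.Chars.replace.go, pvRep]
  | succ n ih =>
    intro l acc hl
    cases l with
    | nil => simp [PySem.Chars.replace.go, pvRep]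
    | cons c t =>
      rw [PySem.Chars.replace.go]
      by_cases hp : (o :: os).isPrefixOf (c :: t) = true
      · rw [if_pos hp]
        have hdrop : List.drop (o :: os).length (c :: t) = t.drop os.length := by
          simp [List.length_cons]
        rw [hdrop]
        rw [ih (t.drop os.length) (new.reverse ++ acc) (by simp [List.length_drop] at hl ⊢; omega)]
        rw [pvRep, if_pos hp]
        simp
      · rw [if_neg hp]
        rw [ih t (c :: acc) (by simp at hl; omega)]
        rw [pvRep, if_neg hp]
        simp

lemma pvRep_eq_replace (o : Char) (os new l : List Char) :
    PySem.Chars.replace l (o :: os) new = pvRep o os new l := by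
  rw [PySem.Chars.replace]
  simp only [List.isEmpty_cons]
  rw [if_neg (by simp)]
  rw [pvRep_go_spec o os new l.length l [] (le_refl _)]
  simp


-- character-wise XML escape (what the three escape replaces jointly do)
def pvEsc (c : Char) : List Char :=
  if c = '&' then ['&', 'a', 'm', 'p', ';']
  else if c = '<' then ['&', 'l', 't', ';']
  else if c = '>' then ['&', 'g', 't', ';']
  else [c]

lemma pvRep_single (d : Char) (new : List Char) (l : List Char) :
    pvRep d [] new l = l.flatMap (fun c => if c = d then new else [c]) := by
  induction l with
  | nil => simp [pvRep]
  | cons c t ih =>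
    rw [pvRep]
    by_cases h : c = d
    · subst h; simp [List.isPrefixOf, ih]
    · simp [List.isPrefixOf, h, Ne.symm h, ih]

lemma pvEscape_chain (l : List Char) :
    pvRep '>' [] ['&', 'g', 't', ';']
      (pvRep '<' [] ['&', 'l', 't', ';']
        (pvRep '&' [] ['&', 'a', 'm', 'p', ';'] l)) = l.flatMap pvEsc := by
  rw [pvRep_single, pvRep_single, pvRep_single]
  induction l with
  | nil => simp
  | cons c t ih =>
    simp only [List.flatMap_cons, List.flatMap_append, ih, pvEsc]
    by_cases h1 : c = '&'
    · subst h1; simp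
    · by_cases h2 : c = '<'
      · subst h2; simp
      · by_cases h3 : c = '>'
        · subst h3; simp
        · simp [h1, h2, h3]

-- token representation: a restored safe tag, or one still-escaped source character
inductive PvTok where
  | tag : List Char → PvTok
  | esc : Char → PvTok
deriving DecidableEq, Repr

def pvInterp1 : PvTok → List Char
  | .tag u => '<' :: u ++ ['>']
  | .esc c => pvEsc c

def pvInterp (toks : List PvTok) : List Char := toks.flatMap pvInterp1

-- one restore pass, on the token representation
def pvConv (tc : List Char) : List PvTok → List PvTok
  | [] => []
  | x :: xs =>
    if x = PvTok.esc '<' ∧ (tc.map PvTok.esc ++ [PvTok.esc '>']).isPrefixOf xs then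
      PvTok.tag tc :: pvConv tc (xs.drop (tc.length + 1))
    else x :: pvConv tc xs
termination_by toks => toks.length
decreasing_by
  all_goals simp [List.length_drop]

def pvConvs (ts : List (List Char)) (toks : List PvTok) : List PvTok :=
  ts.foldl (fun X t => pvConv t X) toks

def pvTagOK (tc : List Char) : Prop :=
  tc ≠ [] ∧ ∀ c ∈ tc, c ≠ '&' ∧ c ≠ '<' ∧ c ≠ '>'

def pvWF (toks : List PvTok) : Prop := ∀ u, PvTok.tag u ∈ toks → '&' ∉ u

-- a '&'-headed pattern skips over any '&'-free stretch
lemma pvRep_skip_no_amp (os new : List Char) (a b : List Char) (ha : '&' ∉ a) :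
    pvRep '&' os new (a ++ b) = a ++ pvRep '&' os new b := by
  induction a with
  | nil => simp
  | cons c t ih =>
    have hc : c ≠ '&' := by intro h; exact ha (by simp [h])
    rw [List.cons_append, pvRep]
    rw [if_neg (by simp [List.isPrefixOf]; intro h; exact absurd h.symm hc)]
    rw [ih (fun h => ha (List.mem_cons_of_mem _ h))]
    simp

lemma pvRep_match_head (o : Char) (os new b : List Char) :
    pvRep o os new ((o :: os) ++ b) = new ++ pvRep o os new b := by
  rw [List.cons_append, pvRep]
  rw [if_pos (by simp [List.isPrefixOf_iff_prefix])]
  congr 1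
  congr 1
  simp

lemma pvCharNe {a b : Char} (h : a ≠ b) : (a == b) = false := beq_eq_false_iff_ne.mpr h

lemma pvEscNe {a b : Char} (h : a ≠ b) : (PvTok.esc a == PvTok.esc b) = false := by
  apply beq_eq_false_iff_ne.mpr; intro hh; cases hh; exact h rfl

lemma pvEscTagNe (a : Char) (u : List Char) : (PvTok.esc a == PvTok.tag u) = false := by
  apply beq_eq_false_iff_ne.mpr; intro hh; cases hh

@[simp] lemma pvInterp_nil : pvInterp [] = [] := rfl

@[simp] lemma pvInterp_cons (x : PvTok) (xs : List PvTok) :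
    pvInterp (x :: xs) = pvInterp1 x ++ pvInterp xs := by
  simp [pvInterp]

@[simp] lemma pvInterp_append (a b : List PvTok) :
    pvInterp (a ++ b) = pvInterp a ++ pvInterp b := by
  simp [pvInterp]

-- the char-level tail pattern matches iff the token-level tail pattern matches
lemma pvMatch_iff (tc : List Char) (h : ∀ c ∈ tc, c ≠ '&' ∧ c ≠ '<' ∧ c ≠ '>') :
    ∀ toks : List PvTok,
      (tc ++ ['&', 'g', 't', ';']).isPrefixOf (pvInterp toks)
        = (tc.map PvTok.esc ++ [PvTok.esc '>']).isPrefixOf toks := by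
  induction tc with
  | nil =>
    intro toks
    cases toks with
    | nil => simp [List.isPrefixOf]
    | cons x xs =>
      cases x with
      | tag u => simp [pvInterp1, List.isPrefixOf]
      | esc c =>
        by_cases h1 : c = '&'
        · subst h1; simp [pvInterp1, pvEsc, List.isPrefixOf]
        · by_cases h2 : c = '<'
          · subst h2; simp [pvInterp1, pvEsc, List.isPrefixOf]
          · by_cases h3 : c = '>'
            · subst h3; simp [pvInterp1, pvEsc, List.isPrefixOf]
            · simp [pvInterp1, pvEsc, h1, h2, h3, List.isPrefixOf,
                    pvCharNe (Ne.symm h1), pvEscNe (Ne.symm h3)]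
  | cons a tc' ih =>
    intro toks
    have ha := h a (by simp)
    have h' : ∀ c ∈ tc', c ≠ '&' ∧ c ≠ '<' ∧ c ≠ '>' := fun c hc => h c (by simp [hc])
    cases toks with
    | nil => simp [List.isPrefixOf]
    | cons x xs =>
      cases x with
      | tag u => simp [pvInterp1, List.isPrefixOf, pvCharNe ha.2.1, pvEscTagNe]
      | esc c =>
        by_cases hca : c = a
        · subst hca
          simp [pvInterp1, pvEsc, ha.1, ha.2.1, ha.2.2, List.isPrefixOf, ih h' xs]
        · by_cases h1 : c = '&'
          · subst h1
            simp [pvInterp1, pvEsc, List.isPrefixOf, pvCharNe ha.1, pvEscNe (Ne.symm hca)]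
          · by_cases h2 : c = '<'
            · subst h2
              simp [pvInterp1, pvEsc, List.isPrefixOf, h1, pvCharNe ha.1, pvEscNe (Ne.symm hca)]
            · by_cases h3 : c = '>'
              · subst h3
                simp [pvInterp1, pvEsc, List.isPrefixOf, h1, h2, pvCharNe ha.1,
                      pvEscNe (Ne.symm hca)]
              · simp [pvInterp1, pvEsc, h1, h2, h3, List.isPrefixOf,
                      pvCharNe (Ne.symm hca), pvEscNe (Ne.symm hca)]

lemma pvInterp_map_esc_plain (tc : List Char)
    (h : ∀ c ∈ tc, c ≠ '&' ∧ c ≠ '<' ∧ c ≠ '>') :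
    pvInterp (tc.map PvTok.esc) = tc := by
  induction tc with
  | nil => simp
  | cons a t iht =>
    have ha := h a (by simp)
    simp only [List.map_cons, pvInterp_cons, pvInterp1, pvEsc,
      if_neg ha.1, if_neg ha.2.1, if_neg ha.2.2]
    rw [iht (fun c hc => h c (by simp [hc]))]
    rfl

-- single pass: the string-level replace equals the token-level conversion
lemma pvPass (tc : List Char) (h : pvTagOK tc) :
    ∀ (n : Nat) (toks : List PvTok), toks.length ≤ n → pvWF toks →
      pvRep '&' ('l' :: 't' :: ';' :: tc ++ ['&', 'g', 't', ';']) ('<' :: tc ++ ['>'])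
          (pvInterp toks)
        = pvInterp (pvConv tc toks) := by
  obtain ⟨hne, hch⟩ := h
  intro n
  induction n with
  | zero =>
    intro toks hl _
    have h0 : toks = [] := List.eq_nil_of_length_eq_zero (Nat.le_zero.mp hl)
    subst h0
    simp [pvConv, pvRep]
  | succ n ih =>
    intro toks hl hwf
    cases toks with
    | nil => simp [pvConv, pvRep]
    | cons x xs =>
      have hlxs : xs.length ≤ n := by simp at hl; omega
      have hwfxs : pvWF xs := fun u hu => hwf u (List.mem_cons_of_mem _ hu)
      cases x with
      | tag u =>
        rw [pvConv, if_neg (by simp)]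
        have hampu : '&' ∉ u := hwf u (by simp)
        have hamp : '&' ∉ ('<' :: u ++ ['>']) := by
          intro hm
          rcases List.mem_cons.mp hm with h1 | h1
          · exact absurd h1.symm (by decide)
          · rcases List.mem_append.mp h1 with h2 | h2
            · exact hampu h2
            · simp at h2
        simp only [pvInterp_cons, pvInterp1]
        rw [pvRep_skip_no_amp _ _ _ _ hamp, ih xs hlxs hwfxs]
      | esc c =>
        by_cases hc : c = '<'
        · subst hc
          by_cases hm : (tc.map PvTok.esc ++ [PvTok.esc '>']).isPrefixOf xs = true
          · obtain ⟨xs', hxs⟩ : ∃ xs', xs = tc.map PvTok.esc ++ PvTok.esc '>' :: xs' := by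
              rw [List.isPrefixOf_iff_prefix] at hm
              obtain ⟨r, hr⟩ := hm
              exact ⟨r, by rw [← hr]; simp⟩
            subst hxs
            rw [pvConv, if_pos ⟨rfl, hm⟩]
            have hd : (tc.map PvTok.esc ++ PvTok.esc '>' :: xs').drop (tc.length + 1) = xs' := by
              rw [show tc.map PvTok.esc ++ PvTok.esc '>' :: xs'
                    = (tc.map PvTok.esc ++ [PvTok.esc '>']) ++ xs' by simp]
              rw [show tc.length + 1 = (tc.map PvTok.esc ++ [PvTok.esc '>']).length by simp]
              exact List.drop_left
            rw [hd]
            have hplain : pvInterp (tc.map PvTok.esc) = tc := pvInterp_map_esc_plain tc hch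
            have hinterp :
                pvInterp (PvTok.esc '<' :: (tc.map PvTok.esc ++ PvTok.esc '>' :: xs'))
                  = ('&' :: ('l' :: 't' :: ';' :: tc ++ ['&', 'g', 't', ';'])) ++ pvInterp xs' := by
              simp only [pvInterp_cons, pvInterp_append, pvInterp1, pvEsc, hplain]
              simp
            rw [hinterp, pvRep_match_head]
            have hwf' : pvWF xs' := fun u hu => hwfxs u (by simp [hu])
            rw [ih xs' (by simp at hlxs; omega) hwf']
            simp [pvInterp1]
          · rw [pvConv, if_neg (fun hco => hm hco.2)]
            have hfalse : ((tc ++ ['&', 'g', 't', ';']).isPrefixOf (pvInterp xs)) = false := by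
              rw [pvMatch_iff tc hch xs, Bool.eq_false_iff]
              exact hm
            simp only [pvInterp_cons, pvInterp1]
            rw [show pvEsc '<' = ['&', 'l', 't', ';'] from rfl]
            rw [show (['&', 'l', 't', ';'] : List Char) ++ pvInterp xs
                  = '&' :: 'l' :: 't' :: ';' :: pvInterp xs from rfl]
            rw [pvRep]
            rw [if_neg (by simp [List.isPrefixOf, hfalse])]
            rw [show ('l' :: 't' :: ';' :: pvInterp xs)
                  = ['l', 't', ';'] ++ pvInterp xs from rfl]
            rw [pvRep_skip_no_amp _ _ _ _ (by decide), ih xs hlxs hwfxs]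
            simp [pvInterp1, pvEsc]
        · rw [pvConv, if_neg (by intro hco; injection hco.1 with hco1; exact hc hco1)]
          simp only [pvInterp_cons, pvInterp1]
          by_cases h1 : c = '&'
          · subst h1
            rw [show pvEsc '&' = ['&', 'a', 'm', 'p', ';'] from rfl]
            rw [show (['&', 'a', 'm', 'p', ';'] : List Char) ++ pvInterp xs
                  = '&' :: 'a' :: 'm' :: 'p' :: ';' :: pvInterp xs from rfl]
            rw [pvRep, if_neg (by simp [List.isPrefixOf])]
            rw [show ('a' :: 'm' :: 'p' :: ';' :: pvInterp xs)
                  = ['a', 'm', 'p', ';'] ++ pvInterp xs from rfl]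
            rw [pvRep_skip_no_amp _ _ _ _ (by decide), ih xs hlxs hwfxs]
            simp [pvInterp1, pvEsc]
          · by_cases h3 : c = '>'
            · subst h3
              rw [show pvEsc '>' = ['&', 'g', 't', ';'] from rfl]
              rw [show (['&', 'g', 't', ';'] : List Char) ++ pvInterp xs
                    = '&' :: 'g' :: 't' :: ';' :: pvInterp xs from rfl]
              rw [pvRep, if_neg (by simp [List.isPrefixOf])]
              rw [show ('g' :: 't' :: ';' :: pvInterp xs)
                    = ['g', 't', ';'] ++ pvInterp xs from rfl]
              rw [pvRep_skip_no_amp _ _ _ _ (by decide), ih xs hlxs hwfxs]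
              simp [pvInterp1, pvEsc]
            · rw [show pvEsc c = [c] by simp [pvEsc, h1, hc, h3]]
              rw [pvRep_skip_no_amp _ _ _ _ (by simp [Ne.symm h1]), ih xs hlxs hwfxs]

lemma pvConv_WF (tc : List Char) (htc : '&' ∉ tc) :
    ∀ (n : Nat) (toks : List PvTok), toks.length ≤ n → pvWF toks → pvWF (pvConv tc toks) := by
  intro n
  induction n with
  | zero =>
    intro toks hl _
    have h0 : toks = [] := List.eq_nil_of_length_eq_zero (Nat.le_zero.mp hl)
    subst h0
    simp [pvConv, pvWF]
  | succ n ih =>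
    intro toks hl hwf
    cases toks with
    | nil => simp [pvConv, pvWF]
    | cons x xs =>
      have hlxs : xs.length ≤ n := by simp at hl; omega
      have hwfxs : pvWF xs := fun u hu => hwf u (List.mem_cons_of_mem _ hu)
      rw [pvConv]
      split_ifs with hcond
      · intro u hu
        rcases List.mem_cons.mp hu with h1 | h1
        · cases h1; exact htc
        · refine ih (xs.drop (tc.length + 1)) (by simp [List.length_drop]; omega) ?_ u h1
          exact fun v hv => hwfxs v (List.mem_of_mem_drop hv)
      · intro u hu
        rcases List.mem_cons.mp hu with h1 | h1
        · exact hwf u (by simp [h1])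
        · exact ih xs hlxs hwfxs u h1

-- an all-esc prefix of a converted list was already a prefix before the pass
lemma pvConvPrefix (tc : List Char) :
    ∀ (n : Nat) (toks : List PvTok) (l : List Char), toks.length ≤ n →
      (l.map PvTok.esc).isPrefixOf (pvConv tc toks) = true →
      (l.map PvTok.esc).isPrefixOf toks = true := by
  intro n
  induction n with
  | zero =>
    intro toks l hl hp
    have h0 : toks = [] := List.eq_nil_of_length_eq_zero (Nat.le_zero.mp hl)
    subst h0
    simpa [pvConv] using hp
  | succ n ih =>
    intro toks l hl hp
    cases toks with
    | nil => simpa [pvConv] using hp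
    | cons x xs =>
      have hlxs : xs.length ≤ n := by simp at hl; omega
      rw [pvConv] at hp
      cases l with
      | nil => simp
      | cons c l' =>
        split_ifs at hp with hcond
        · simp [List.isPrefixOf, pvEscTagNe] at hp
        · simp only [List.map_cons, List.isPrefixOf] at hp ⊢
          rw [Bool.and_eq_true] at hp ⊢
          exact ⟨hp.1, ih xs l' hlxs hp.2⟩

-- distinct safe tags cannot token-match each other's head
lemma pvTagNoMatch (t tg : List Char) (hne : t ≠ tg)
    (ht : ∀ c ∈ t, c ≠ '&' ∧ c ≠ '<' ∧ c ≠ '>')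
    (htg : ∀ c ∈ tg, c ≠ '&' ∧ c ≠ '<' ∧ c ≠ '>') (X : List PvTok) :
    (t.map PvTok.esc ++ [PvTok.esc '>']).isPrefixOf (tg.map PvTok.esc ++ PvTok.esc '>' :: X)
      = false := by
  induction t generalizing tg with
  | nil =>
    cases tg with
    | nil => exact absurd rfl hne
    | cons c tg' =>
      have hc := htg c (by simp)
      simp [List.isPrefixOf, pvEscNe (Ne.symm hc.2.2)]
  | cons a t' ih =>
    have ha := ht a (by simp)
    cases tg with
    | nil => simp [List.isPrefixOf, pvEscNe ha.2.2]
    | cons c tg' =>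
      by_cases hac : a = c
      · subst hac
        simp only [List.map_cons, List.cons_append, List.isPrefixOf]
        rw [ih tg' (fun hh => hne (by rw [hh])) (fun d hd => ht d (by simp [hd]))
            (fun d hd => htg d (by simp [hd]))]
        simp
      · simp [List.isPrefixOf, pvEscNe hac]


@[simp] lemma pvConv_nil (tc : List Char) : pvConv tc [] = [] := by simp [pvConv]

lemma pvConvs_nil (ts : List (List Char)) : pvConvs ts [] = [] := by
  induction ts with
  | nil => rfl
  | cons t ts ih => simp [pvConvs, List.foldl_cons] at ih ⊢; simpa using ih

lemma pvConv_keep_tag (tc u : List Char) (Y : List PvTok) :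
    pvConv tc (PvTok.tag u :: Y) = PvTok.tag u :: pvConv tc Y := by
  rw [pvConv, if_neg (by intro hco; cases hco.1)]

lemma pvConvs_keep_tag (ts : List (List Char)) (u : List Char) (Y : List PvTok) :
    pvConvs ts (PvTok.tag u :: Y) = PvTok.tag u :: pvConvs ts Y := by
  induction ts generalizing Y with
  | nil => rfl
  | cons t ts ih => simp only [pvConvs, List.foldl_cons] at ih ⊢; rw [pvConv_keep_tag, ih]

lemma pvConv_keep_esc (tc : List Char) (c : Char) (hc : c ≠ '<') (X : List PvTok) :
    pvConv tc (PvTok.esc c :: X) = PvTok.esc c :: pvConv tc X := by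
  rw [pvConv, if_neg (by intro hco; injection hco.1 with h; exact hc h)]

lemma pvConvs_keep_esc (ts : List (List Char)) (c : Char) (hc : c ≠ '<') (X : List PvTok) :
    pvConvs ts (PvTok.esc c :: X) = PvTok.esc c :: pvConvs ts X := by
  induction ts generalizing X with
  | nil => rfl
  | cons t ts ih => simp only [pvConvs, List.foldl_cons] at ih ⊢; rw [pvConv_keep_esc _ _ hc, ih]

lemma pvConv_keep_lt (tc : List Char) (X : List PvTok)
    (h : (tc.map PvTok.esc ++ [PvTok.esc '>']).isPrefixOf X = false) :
    pvConv tc (PvTok.esc '<' :: X) = PvTok.esc '<' :: pvConv tc X := by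
  rw [pvConv, if_neg (by intro hco; rw [hco.2] at h; cases h)]

lemma pvConvs_keep_lt (ts : List (List Char)) (X : List PvTok)
    (h : ∀ t ∈ ts, ((t ++ ['>']).map PvTok.esc).isPrefixOf X = false) :
    pvConvs ts (PvTok.esc '<' :: X) = PvTok.esc '<' :: pvConvs ts X := by
  induction ts generalizing X with
  | nil => rfl
  | cons t ts ih =>
    simp only [pvConvs, List.foldl_cons] at ih ⊢
    rw [pvConv_keep_lt t X (by have := h t (by simp); simpa using this)]
    refine ih (pvConv t X) ?_
    intro t' ht'
    rw [Bool.eq_false_iff]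
    intro hpre
    have := pvConvPrefix t X.length X (t' ++ ['>']) le_rfl hpre
    rw [h t' (by simp [ht'])] at this
    cases this

lemma pvConv_skip_mapesc (tc : List Char) (l : List Char) (hl : '<' ∉ l) (X : List PvTok) :
    pvConv tc (l.map PvTok.esc ++ X) = l.map PvTok.esc ++ pvConv tc X := by
  induction l with
  | nil => rfl
  | cons c l' ih =>
    have hc : c ≠ '<' := fun h => hl (by simp [h])
    simp only [List.map_cons, List.cons_append]
    rw [pvConv_keep_esc _ _ hc, ih (fun h => hl (by simp [h]))]

lemma pvConv_tag_match (tg : List Char) (X : List PvTok) :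
    pvConv tg (PvTok.esc '<' :: (tg.map PvTok.esc ++ PvTok.esc '>' :: X))
      = PvTok.tag tg :: pvConv tg X := by
  rw [pvConv, if_pos ⟨rfl, by
    rw [List.isPrefixOf_iff_prefix,
      show tg.map PvTok.esc ++ PvTok.esc '>' :: X = (tg.map PvTok.esc ++ [PvTok.esc '>']) ++ X by simp]
    exact List.prefix_append _ _⟩]
  congr 1
  congr 1
  rw [show tg.map PvTok.esc ++ PvTok.esc '>' :: X = (tg.map PvTok.esc ++ [PvTok.esc '>']) ++ X by simp]
  rw [show tg.length + 1 = (tg.map PvTok.esc ++ [PvTok.esc '>']).length by simp]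
  exact List.drop_left

lemma pvConv_tag_skip (t tg : List Char) (hne : t ≠ tg)
    (ht : ∀ c ∈ t, c ≠ '&' ∧ c ≠ '<' ∧ c ≠ '>')
    (htg : ∀ c ∈ tg, c ≠ '&' ∧ c ≠ '<' ∧ c ≠ '>') (X : List PvTok) :
    pvConv t (PvTok.esc '<' :: (tg.map PvTok.esc ++ PvTok.esc '>' :: X))
      = PvTok.esc '<' :: (tg.map PvTok.esc ++ PvTok.esc '>' :: pvConv t X) := by
  rw [pvConv_keep_lt t _ (pvTagNoMatch t tg hne ht htg X)]
  rw [show tg.map PvTok.esc ++ PvTok.esc '>' :: X = (tg ++ ['>']).map PvTok.esc ++ X by simp]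
  rw [pvConv_skip_mapesc t (tg ++ ['>'])
    (by intro hm; rcases List.mem_append.mp hm with h1 | h1
        · exact (htg '<' h1).2.1 rfl
        · simp at h1)]
  simp

lemma pvConvs_tag_head (ts₁ ts₂ : List (List Char)) (tg : List Char)
    (h1 : ∀ t ∈ ts₁, t ≠ tg) (hOK1 : ∀ t ∈ ts₁, pvTagOK t) (hOKg : pvTagOK tg)
    (X : List PvTok) :
    pvConvs (ts₁ ++ tg :: ts₂) (PvTok.esc '<' :: (tg.map PvTok.esc ++ PvTok.esc '>' :: X))
      = PvTok.tag tg :: pvConvs (ts₁ ++ tg :: ts₂) X := by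
  have step1 : pvConvs ts₁ (PvTok.esc '<' :: (tg.map PvTok.esc ++ PvTok.esc '>' :: X))
      = PvTok.esc '<' :: (tg.map PvTok.esc ++ PvTok.esc '>' :: pvConvs ts₁ X) := by
    induction ts₁ generalizing X with
    | nil => rfl
    | cons t ts ih =>
      simp only [pvConvs, List.foldl_cons] at ih ⊢
      rw [pvConv_tag_skip t tg (h1 t (by simp)) (hOK1 t (by simp)).2 hOKg.2]
      exact ih (fun t' ht' => h1 t' (by simp [ht'])) (fun t' ht' => hOK1 t' (by simp [ht'])) _
  unfold pvConvs
  rw [List.foldl_append, List.foldl_cons]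
  have step1' := step1
  unfold pvConvs at step1'
  rw [step1', pvConv_tag_match]
  rw [show (PvTok.tag tg :: pvConv tg (List.foldl (fun X t => pvConv t X) X ts₁)) =
        PvTok.tag tg :: pvConv tg (List.foldl (fun X t => pvConv t X) X ts₁) from rfl]
  have := pvConvs_keep_tag ts₂ tg (pvConv tg (List.foldl (fun X t => pvConv t X) X ts₁))
  unfold pvConvs at this
  rw [this, List.foldl_append, List.foldl_cons]

-- all twelve restore passes at once
lemma pvPasses (ts : List (List Char)) (h : ∀ t ∈ ts, pvTagOK t) :
    ∀ toks : List PvTok, pvWF toks →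
      ts.foldl
        (fun u t =>
          pvRep '&' ('l' :: 't' :: ';' :: t ++ ['&', 'g', 't', ';']) ('<' :: t ++ ['>']) u)
        (pvInterp toks)
      = pvInterp (pvConvs ts toks) := by
  induction ts with
  | nil => intro toks _; rfl
  | cons t ts ih =>
    intro toks hwf
    simp only [List.foldl_cons, pvConvs] at ih ⊢
    rw [pvPass t (h t (by simp)) toks.length toks le_rfl hwf]
    exact ih (fun t' ht' => h t' (by simp [ht'])) _
      (pvConv_WF t (fun hm => ((h t (by simp)).2 '&' hm).1 rfl) toks.length toks le_rfl hwf)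

lemma pvMapEscPrefix (l r : List Char) :
    ((l.map PvTok.esc).isPrefixOf (r.map PvTok.esc)) = l.isPrefixOf r := by
  induction l generalizing r with
  | nil => simp [List.isPrefixOf]
  | cons c l' ih =>
    cases r with
    | nil => simp [List.isPrefixOf]
    | cons d r' =>
      simp only [List.map_cons, List.isPrefixOf, ih]
      by_cases h : c = d
      · simp [h]
      · simp [pvCharNe h, pvEscNe h]

lemma pvTagsOK : ∀ t ∈ pvSafeTagsL, pvTagOK t := by
  intro t ht
  simp only [pvSafeTagsL, List.mem_cons, List.not_mem_nil, or_false] at ht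
  rcases ht with rfl | rfl | rfl | rfl | rfl | rfl | rfl | rfl | rfl | rfl | rfl | rfl <;>
    · refine ⟨by simp, ?_⟩
      intro c hc
      fin_cases hc <;> exact ⟨by decide, by decide, by decide⟩

lemma pvTagsNodup : pvSafeTagsL.Nodup := by decide

-- the composed token passes implement the one-pass scanner
lemma pvMaster : ∀ (n : Nat) (l : List Char), l.length ≤ n →
    pvInterp (pvConvs pvSafeTagsL (l.map PvTok.esc)) = pvScan l := by
  intro n
  induction n with
  | zero =>
    intro l hl
    have h0 : l = [] := List.eq_nil_of_length_eq_zero (Nat.le_zero.mp hl)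
    subst h0
    simp [pvConvs_nil, pvScan]
  | succ n ih =>
    intro l hl
    cases l with
    | nil => simp [pvConvs_nil, pvScan]
    | cons c r =>
      have hlr : r.length ≤ n := by simp at hl; omega
      by_cases hc : c = '<'
      · subst hc
        cases hft : pvFindTag ('<' :: r) with
        | some tg =>
          have htgmem : tg ∈ pvSafeTagsL := List.mem_of_find?_eq_some hft
          have hpred := List.find?_some hft
          rw [List.isPrefixOf_iff_prefix] at hpred
          obtain ⟨rest, hrest⟩ := hpred
          have hr : r = tg ++ '>' :: rest := by
            have := hrest
            simp only [List.cons_append, List.append_assoc] at this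
            injection this with _ h2
            simpa using h2.symm
          subst hr
          obtain ⟨ts₁, ts₂, hsplit⟩ := List.append_of_mem htgmem
          have hnodup := pvTagsNodup
          rw [hsplit] at hnodup
          have hne1 : ∀ t ∈ ts₁, t ≠ tg :=
            fun t ht => (List.nodup_append.mp hnodup).2.2 t ht tg (by simp)
          have hOK : ∀ t ∈ pvSafeTagsL, pvTagOK t := pvTagsOK
          rw [hsplit] at hOK
          have hchain := pvConvs_tag_head ts₁ ts₂ tg hne1
            (fun t ht => hOK t (by simp [ht])) (hOK tg (by simp)) (List.map PvTok.esc rest)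
          rw [show List.map PvTok.esc ('<' :: (tg ++ '>' :: rest))
                = PvTok.esc '<' :: (tg.map PvTok.esc ++ PvTok.esc '>' :: List.map PvTok.esc rest)
              by simp]
          rw [hsplit, hchain, ← hsplit]
          have hrest_len : rest.length ≤ n := by
            simp [List.length_append] at hlr; omega
          rw [pvInterp_cons, pvInterp1, ih rest hrest_len]
          rw [pvScan, if_pos rfl, hft]
          congr 1
          rw [show tg ++ '>' :: rest = (tg ++ ['>']) ++ rest by simp]
          rw [show tg.length + 1 = (tg ++ ['>']).length by simp]
          rw [List.drop_left]
        | none =>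
          have hnone := List.find?_eq_none.mp hft
          rw [show List.map PvTok.esc ('<' :: r) = PvTok.esc '<' :: List.map PvTok.esc r
              by simp]
          rw [pvConvs_keep_lt pvSafeTagsL (List.map PvTok.esc r) ?hpre]
          · rw [pvInterp_cons, pvInterp1, ih r hlr]
            rw [pvScan, if_pos rfl, hft]
            rfl
          case hpre =>
            intro t ht
            have hnp := hnone t ht
            rw [pvMapEscPrefix]
            rw [Bool.eq_false_iff]
            intro hpre
            apply hnp
            simp only [List.isPrefixOf, List.cons_append]
            simp [hpre]
      · rw [show List.map PvTok.esc (c :: r) = PvTok.esc c :: List.map PvTok.esc r by simp]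
        rw [pvConvs_keep_esc pvSafeTagsL c hc]
        rw [pvInterp_cons, pvInterp1, ih r hlr]
        by_cases h1 : c = '&'
        · subst h1; rw [pvScan]; simp [pvEsc]
        · by_cases h3 : c = '>'
          · subst h3; rw [pvScan]; simp [pvEsc]
          · rw [pvScan]; simp [pvEsc, h1, hc, h3]


lemma pvWF_map_esc (l : List Char) : pvWF (l.map PvTok.esc) := by
  intro u hu
  exfalso
  obtain ⟨c, _, hc⟩ := List.mem_map.mp hu
  cases hc

-- the full fifteen-pass pipeline equals the one-pass scanner, on char lists
lemma pvKey (l : List Char) :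
    pvSafeTagsL.foldl
      (fun u t =>
        pvRep '&' ('l' :: 't' :: ';' :: t ++ ['&', 'g', 't', ';']) ('<' :: t ++ ['>']) u)
      (pvRep '>' [] ['&', 'g', 't', ';']
        (pvRep '<' [] ['&', 'l', 't', ';']
          (pvRep '&' [] ['&', 'a', 'm', 'p', ';'] l)))
    = pvScan l := by
  rw [pvEscape_chain]
  rw [show l.flatMap pvEsc = pvInterp (l.map PvTok.esc) by rw [pvInterp, List.flatMap_map]; rfl]
  rw [pvPasses pvSafeTagsL pvTagsOK _ (pvWF_map_esc l)]
  exact pvMaster l.length l le_rfl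

-- ===== VERDICT (by name: the statement is the Claim_ definition above) =====
theorem rich_py_spec : Claim_equal_rich_py := by
  unfold Claim_equal_rich_py Spec_rich_py
  intro s _
  by_cases hs : s = ""
  · subst hs; simp [rich_py, rich_py_alt]
  · have hk := pvKey s.toList
    simp only [pvSafeTagsL, List.foldl_cons, List.foldl_nil, List.cons_append,
      List.nil_append] at hk
    rw [rich_py, rich_py_alt, if_neg hs, if_neg hs]
    simp only [pvSafeTags, List.foldl_cons, List.foldl_nil, PySem.Str.replace,
      String.toList_ofList,
      show ("&" : String).toList = ['&'] by rfl,
      show ("&amp;" : String).toList = ['&', 'a', 'm', 'p', ';'] by rfl,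
      show ("<" : String).toList = ['<'] by rfl,
      show ("&lt;" : String).toList = ['&', 'l', 't', ';'] by rfl,
      show (">" : String).toList = ['>'] by rfl,
      show ("&gt;" : String).toList = ['&', 'g', 't', ';'] by rfl,
      show ("&lt;" ++ "b" ++ "&gt;" : String).toList = ['&', 'l', 't', ';', 'b', '&', 'g', 't', ';'] by rfl,
      show ("<" ++ "b" ++ ">" : String).toList = ['<', 'b', '>'] by rfl,
      show ("&lt;" ++ "/b" ++ "&gt;" : String).toList = ['&', 'l', 't', ';', '/', 'b', '&', 'g', 't', ';'] by rfl,
      show ("<" ++ "/b" ++ ">" : String).toList = ['<', '/', 'b', '>'] by rfl,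
      show ("&lt;" ++ "i" ++ "&gt;" : String).toList = ['&', 'l', 't', ';', 'i', '&', 'g', 't', ';'] by rfl,
      show ("<" ++ "i" ++ ">" : String).toList = ['<', 'i', '>'] by rfl,
      show ("&lt;" ++ "/i" ++ "&gt;" : String).toList = ['&', 'l', 't', ';', '/', 'i', '&', 'g', 't', ';'] by rfl,
      show ("<" ++ "/i" ++ ">" : String).toList = ['<', '/', 'i', '>'] by rfl,
      show ("&lt;" ++ "u" ++ "&gt;" : String).toList = ['&', 'l', 't', ';', 'u', '&', 'g', 't', ';'] by rfl,
      show ("<" ++ "u" ++ ">" : String).toList = ['<', 'u', '>'] by rfl,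
      show ("&lt;" ++ "/u" ++ "&gt;" : String).toList = ['&', 'l', 't', ';', '/', 'u', '&', 'g', 't', ';'] by rfl,
      show ("<" ++ "/u" ++ ">" : String).toList = ['<', '/', 'u', '>'] by rfl,
      show ("&lt;" ++ "br/" ++ "&gt;" : String).toList = ['&', 'l', 't', ';', 'b', 'r', '/', '&', 'g', 't', ';'] by rfl,
      show ("<" ++ "br/" ++ ">" : String).toList = ['<', 'b', 'r', '/', '>'] by rfl,
      show ("&lt;" ++ "br /" ++ "&gt;" : String).toList = ['&', 'l', 't', ';', 'b', 'r', ' ', '/', '&', 'g', 't', ';'] by rfl,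
      show ("<" ++ "br /" ++ ">" : String).toList = ['<', 'b', 'r', ' ', '/', '>'] by rfl,
      show ("&lt;" ++ "sub" ++ "&gt;" : String).toList = ['&', 'l', 't', ';', 's', 'u', 'b', '&', 'g', 't', ';'] by rfl,
      show ("<" ++ "sub" ++ ">" : String).toList = ['<', 's', 'u', 'b', '>'] by rfl,
      show ("&lt;" ++ "/sub" ++ "&gt;" : String).toList = ['&', 'l', 't', ';', '/', 's', 'u', 'b', '&', 'g', 't', ';'] by rfl,
      show ("<" ++ "/sub" ++ ">" : String).toList = ['<', '/', 's', 'u', 'b', '>'] by rfl,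
      show ("&lt;" ++ "sup" ++ "&gt;" : String).toList = ['&', 'l', 't', ';', 's', 'u', 'p', '&', 'g', 't', ';'] by rfl,
      show ("<" ++ "sup" ++ ">" : String).toList = ['<', 's', 'u', 'p', '>'] by rfl,
      show ("&lt;" ++ "/sup" ++ "&gt;" : String).toList = ['&', 'l', 't', ';', '/', 's', 'u', 'p', '&', 'g', 't', ';'] by rfl,
      show ("<" ++ "/sup" ++ ">" : String).toList = ['<', '/', 's', 'u', 'p', '>'] by rfl]
    simp only [pvRep_eq_replace]
    rw [hk]
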